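-- pv_equiv track=rewrite | github.com/hyxxnii/Algorithm-Coding-Test | 이코테-2021/3. BFS&DFS/3장 기출 문제/4. 괄호 변환.py | solution
-- ===== SOURCE A (Python) =====
-- def is_correct(p):
--     cnt = 0
--     for i in p:
--         if i == '(':
--             cnt += 1
--         else:
--             if cnt == 0:
--                 return False
--             else:
--                 cnt -= 1
--     return True
--
-- def seperate_to_balance(p):
--     cnt = 0
--     for i in range(len(p)):
--         if p[i] == '(': cnt +=1
--         else: cnt -= 1
--         if cnt == 0:
--             break
--     return i
--
-- def solution(p):
--     if is_correct(p):
--         return p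
--
--     inx = seperate_to_balance(p)
--     u = p[:inx+1]
--     v = p[inx+1:]
--     if is_correct(u):
--         answer = u + solution(v)
--     else:
--         answer = '('
--         answer += solution(v)
--         answer += ')'
--         u = list(u[1:-1])
--         for i in range(len(u)):
--             if u[i] == '(':
--                 u[i] = ')'
--             else:
--                 u[i] = '('
--         answer += ''.join(u)
--
--     return answer
-- ===== SOURCE B (Python) =====
-- def solution(p):
--     # One pass: cut p into minimal zero-count blocks, locate the last "bad"
--     # block (one not starting with '('), transform every block before that
--     # point, and keep the rest verbatim.  O(n) instead of A's O(n^2) recursion.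
--     blocks = []
--     cnt = 0
--     cur = []
--     for c in p:
--         cur.append(c)
--         cnt += 1 if c == '(' else -1
--         if cnt == 0:
--             blocks.append(''.join(cur))
--             cur = []
--     if cur:
--         blocks.append(''.join(cur))
--     m = 0
--     for j in range(len(blocks)):
--         if blocks[j][0] != '(':
--             m = j + 1
--     pre = []
--     suf = []
--     for b in blocks[:m]:
--         if b[0] == '(':
--             pre.append(b)
--         else:
--             pre.append('(')
--             suf.append(')' + ''.join(')' if ch == '(' else '(' for ch in b[1:-1]))
--     return ''.join(pre) + ''.join(blocks[m:]) + ''.join(reversed(suf))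
-- ===== Notes on version B (the rewrite author's own statement) =====
-- stated objective: alternative
-- what changed: A recursively re-runs is_correct and re-splits the remainder from scratch at every level; B is non-recursive: one block decomposition of the whole string into minimal zero-count blocks, then the last block not starting with '(' is located and the blocks before that point are transformed in a single fold, the rest kept verbatim.
import Mathlib
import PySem

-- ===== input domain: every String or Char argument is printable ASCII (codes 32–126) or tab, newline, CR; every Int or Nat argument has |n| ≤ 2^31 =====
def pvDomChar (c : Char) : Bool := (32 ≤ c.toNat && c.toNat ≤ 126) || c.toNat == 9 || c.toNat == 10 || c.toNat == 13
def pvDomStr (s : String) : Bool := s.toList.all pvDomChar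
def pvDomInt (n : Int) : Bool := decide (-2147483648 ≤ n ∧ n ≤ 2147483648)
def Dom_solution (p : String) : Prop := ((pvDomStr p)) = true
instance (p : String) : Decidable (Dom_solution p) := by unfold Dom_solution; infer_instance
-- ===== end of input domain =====

-- B replaces A's recursion (which re-runs is_correct and re-splits the remainder at every
-- level) by a non-recursive block decomposition: cut the string into minimal zero-count
-- blocks once, find the last block not starting with '(', and transform the blocks before
-- that point in one fold, keeping the rest verbatim.

-- ===== PORT A =====

-- is_correct: scan with a counter, fail when a closer meets counter 0
def isCorrectAux : List Char → Int → Bool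
  | [], _ => true
  | c :: r, cnt =>
      if c = '(' then isCorrectAux r (cnt + 1)
      else if cnt = 0 then false else isCorrectAux r (cnt - 1)

-- seperate_to_balance: Python's loop variable i after the loop — the first position where
-- the running count hits 0, or len - 1 if it never does (only called on nonempty input)
def sepAux : List Char → Int → Int → Int
  | [], _, i => i - 1
  | c :: r, cnt, i =>
      let cnt' := if c = '(' then cnt + 1 else cnt - 1
      if cnt' = 0 then i else sepAux r cnt' (i + 1)

-- the element-wise flip A applies to u[1:-1] ('(' -> ')', anything else -> '(')
def pyflip (c : Char) : Char := if c = '(' then ')' else '('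

-- termination helper for solutionCore (cited in decreasing_by)
theorem sepAux_ge (l : List Char) (cnt i : Int) (h : l ≠ []) : i ≤ sepAux l cnt i := by
  induction l generalizing cnt i with
  | nil => exact absurd rfl h
  | cons c r ih =>
      simp only [sepAux]
      by_cases h0 : (if c = '(' then cnt + 1 else cnt - 1) = 0
      · simp [h0]
      · simp only [if_neg h0]
        cases r with
        | nil => simp only [sepAux]; omega
        | cons d r' =>
            have := ih (if c = '(' then cnt + 1 else cnt - 1) (i + 1) (by simp)
            omega

-- solution (A), on the code points of p
def solutionCore (l : List Char) : List Char :=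
  if isCorrectAux l 0 = true then l
  else
    let inx := sepAux l 0 0
    let u := PySem.List.slice l none (some (inx + 1))
    let v := PySem.List.slice l (some (inx + 1)) none
    if isCorrectAux u 0 = true then u ++ solutionCore v
    else '(' :: (solutionCore v ++ ')' :: (PySem.List.slice u (some 1) (some (-1))).map pyflip)
termination_by l.length
decreasing_by
  all_goals
  · have hne : l ≠ [] := by
      rintro rfl; simp [isCorrectAux] at *
    have h0 : (0 : Int) ≤ sepAux l 0 0 := sepAux_ge l 0 0 hne
    rw [PySem.List.slice_from l (by omega : (0:Int) ≤ sepAux l 0 0 + 1)]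
    have hlp : 0 < l.length := by cases l <;> simp_all
    simp only [List.length_drop]
    omega

def solution (p : String) : String := String.mk (solutionCore p.toList)

-- ===== PORT B =====

-- the block-splitting loop of Source B: cut at every return of the running count to 0,
-- keep a trailing nonempty remainder as a final block
def splitAux : List Char → Int → List Char → List (List Char)
  | [], _, cur => if cur = [] then [] else [cur]
  | c :: r, cnt, cur =>
      let cur' := cur ++ [c]
      let cnt' := if c = '(' then cnt + 1 else cnt - 1
      if cnt' = 0 then cur' :: splitAux r 0 [] else splitAux r cnt' cur'

-- the m-loop of Source B: 1 + index of the last block not starting with '(' (0 if none)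
def findM : List (List Char) → Int → Int → Int
  | [], _, m => m
  | b :: r, j, m => findM r (j + 1) (if b.head? ≠ some '(' then j + 1 else m)

-- the transformation loop of Source B over blocks[:m], accumulating pre and suf
def goPS : List (List Char) → List (List Char) → List (List Char) →
    List (List Char) × List (List Char)
  | [], pre, suf => (pre, suf)
  | b :: r, pre, suf =>
      if b.head? = some '(' then goPS r (pre ++ [b]) suf
      else goPS r (pre ++ [['(']])
             (suf ++ [')' :: (PySem.List.slice b (some 1) (some (-1))).map pyflip])

-- solution (B): join pre, the untouched blocks[m:], and the reversed suf
def solutionAltCore (l : List Char) : List Char :=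
  let blocks := splitAux l 0 []
  let m := findM blocks 0 0
  let ps := goPS (PySem.List.slice blocks none (some m)) [] []
  ps.1.flatten ++ (PySem.List.slice blocks (some m) none).flatten ++ ps.2.reverse.flatten

def solution_alt (p : String) : String := String.mk (solutionAltCore p.toList)

-- ===== PRECONDITION & SPEC =====
def Spec_solution (p : String) (out : String) : Prop := out = solution_alt p
instance (p : String) (out : String) : Decidable (Spec_solution p out) := by unfold Spec_solution; infer_instance

-- ===== CLAIM (what is proved, stated in full; the proofs are below) =====
def Claim_equal_solution : Prop := ∀ (p : String), Dom_solution p → Spec_solution p (solution p)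

-- ===== LEMMAS AND PROOFS =====

-- spec helper: 1-based length of the shortest prefix on which the running count hits 0
def fz : List Char → Int → Option Nat
  | [], _ => none
  | c :: r, cnt =>
      let cnt' := if c = '(' then cnt + 1 else cnt - 1
      if cnt' = 0 then some 1 else (fz r cnt').map (· + 1)

-- spec helper for findM: index of the last block not starting with '('
def lastBad : List (List Char) → Option Nat
  | [] => none
  | b :: r =>
      match lastBad r with
      | some i => some (i + 1)
      | none => if b.head? ≠ some '(' then some 0 else none

theorem fz_bounds (l : List Char) (cnt : Int) (k : Nat) (h : fz l cnt = some k) :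
    1 ≤ k ∧ k ≤ l.length := by
  induction l generalizing cnt k with
  | nil => simp [fz] at h
  | cons c r ih =>
      simp only [fz] at h
      by_cases h0 : (if c = '(' then cnt + 1 else cnt - 1) = 0
      · simp [h0] at h; simp [List.length_cons]; omega
      · simp only [if_neg h0, Option.map_eq_some_iff] at h
        obtain ⟨k', hk', rfl⟩ := h
        have := ih _ _ hk'
        simp; omega

theorem sepAux_spec (l : List Char) (cnt i : Int) :
    sepAux l cnt i = i + ((fz l cnt).getD l.length : Nat) - 1 := by
  induction l generalizing cnt i with
  | nil => simp [sepAux, fz]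
  | cons c r ih =>
      simp only [sepAux, fz]
      by_cases h0 : (if c = '(' then cnt + 1 else cnt - 1) = 0
      · simp [h0]
      · simp only [if_neg h0, ih]
        cases hf : fz r (if c = '(' then cnt + 1 else cnt - 1) <;> simp [hf] <;> push_cast <;> ring

theorem splitAux_spec (l : List Char) (cnt : Int) (cur : List Char) :
    splitAux l cnt cur = match fz l cnt with
      | some k => (cur ++ l.take k) :: splitAux (l.drop k) 0 []
      | none => if cur ++ l = [] then [] else [cur ++ l] := by
  induction l generalizing cnt cur with
  | nil => simp [splitAux, fz]
  | cons c r ih =>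
      simp only [splitAux, fz]
      by_cases h0 : (if c = '(' then cnt + 1 else cnt - 1) = 0
      · simp [h0]
      · simp only [if_neg h0, ih]
        cases hf : fz r (if c = '(' then cnt + 1 else cnt - 1) with
        | none => simp
        | some k => simp [List.take_succ_cons, List.drop_succ_cons]

theorem splitAux_flatten (l : List Char) (cnt : Int) (cur : List Char) :
    (splitAux l cnt cur).flatten = cur ++ l := by
  induction l generalizing cnt cur with
  | nil => simp [splitAux]; split <;> simp_all
  | cons c r ih =>
      simp only [splitAux]
      by_cases h0 : (if c = '(' then cnt + 1 else cnt - 1) = 0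
      · simp [h0, ih]
      · simp [h0, ih]

theorem findM_spec (bs : List (List Char)) (j m : Int) :
    findM bs j m = match lastBad bs with
      | some i => j + i + 1
      | none => m := by
  induction bs generalizing j m with
  | nil => simp [findM, lastBad]
  | cons b r ih =>
      simp only [findM, lastBad, ih]
      cases hl : lastBad r with
      | none => simp only [hl]; split <;> simp
      | some i => simp only [hl]; push_cast; ring

theorem lastBad_none_iff (bs : List (List Char)) :
    lastBad bs = none ↔ ∀ b ∈ bs, b.head? = some '(' := by
  induction bs with
  | nil => simp [lastBad]
  | cons b r ih =>
      simp only [lastBad]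
      cases hl : lastBad r with
      | some i => simp [← ih, hl]
      | none => simp only [hl]; split <;> simp_all [← ih]

theorem goPS_acc (bs pre suf : List (List Char)) :
    goPS bs pre suf = (pre ++ (goPS bs [] []).1, suf ++ (goPS bs [] []).2) := by
  induction bs generalizing pre suf with
  | nil => simp [goPS]
  | cons b r ih =>
      simp only [goPS]
      split
      · rw [ih]; conv_rhs => rw [ih]
        simp
      · rw [ih]; conv_rhs => rw [ih]
        simp

theorem isCorrectAux_cons (c : Char) (r : List Char) (cnt : Int) (h : cnt ≠ 0) :
    isCorrectAux (c :: r) cnt = isCorrectAux r (if c = '(' then cnt + 1 else cnt - 1) := by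
  by_cases hc : c = '(' <;> simp [isCorrectAux, hc, h]

-- scanning from a positive count: no zero ahead means no failure; a zero at k splits the scan
theorem scan_split (l : List Char) (cnt : Int) (h1 : 1 ≤ cnt) :
    (fz l cnt = none → isCorrectAux l cnt = true) ∧
    (∀ k, fz l cnt = some k →
      isCorrectAux l cnt = isCorrectAux (l.drop k) 0 ∧ isCorrectAux (l.take k) cnt = true) := by
  induction l generalizing cnt with
  | nil => simp [fz, isCorrectAux]
  | cons c r ih =>
      have hstep : isCorrectAux (c :: r) cnt
          = isCorrectAux r (if c = '(' then cnt + 1 else cnt - 1) :=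
        isCorrectAux_cons c r cnt (by omega)
      by_cases h0 : (if c = '(' then cnt + 1 else cnt - 1) = 0
      · constructor
        · intro hn; simp [fz, h0] at hn
        · intro k hk
          simp [fz, h0] at hk
          have hc : c ≠ '(' := by intro h; simp [h] at h0; omega
          have hcnt : cnt = 1 := by simp [hc] at h0; omega
          subst hk
          refine ⟨?_, ?_⟩
          · simp [hstep, h0]
          · simp [isCorrectAux, hc, hcnt]
      · have h1' : 1 ≤ (if c = '(' then cnt + 1 else cnt - 1) := by
          by_cases hc : c = '(' <;> simp [hc] at h0 ⊢ <;> omega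
        obtain ⟨ihn, ihs⟩ := ih _ h1'
        constructor
        · intro hn
          simp only [fz, if_neg h0, Option.map_eq_none_iff] at hn
          rw [hstep]; exact ihn hn
        · intro k hk
          simp only [fz, if_neg h0, Option.map_eq_some_iff] at hk
          obtain ⟨k', hk', rfl⟩ := hk
          obtain ⟨hd, ht⟩ := ihs k' hk'
          refine ⟨?_, ?_⟩
          · rw [hstep, hd]; simp
          · simp only [List.take_succ_cons]
            rw [isCorrectAux_cons c _ cnt (by omega)]
            exact ht

theorem correct_iff_blocks_aux : ∀ (n : Nat) (l : List Char), l.length ≤ n →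
    (isCorrectAux l 0 = true ↔ ∀ b ∈ splitAux l 0 [], b.head? = some '(') := by
  intro n
  induction n with
  | zero =>
      intro l hl
      have : l = [] := by cases l <;> simp_all
      subst this; simp [splitAux, isCorrectAux]
  | succ n ih =>
      intro l hl
      cases l with
      | nil => simp [splitAux, isCorrectAux]
      | cons c r =>
          by_cases hc : c = '('
          · subst hc
            have hstep : isCorrectAux ('(' :: r) 0 = isCorrectAux r 1 := by
              simp [isCorrectAux]
            have hfz : fz ('(' :: r) 0 = (fz r 1).map (· + 1) := by
              simp [fz]
            cases hf : fz r 1 with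
            | none =>
                have hsp := splitAux_spec ('(' :: r) 0 []
                rw [hfz, hf] at hsp
                simp at hsp
                rw [hsp, hstep]
                have := (scan_split r 1 (by omega)).1 hf
                simp [this]
            | some k' =>
                have hsp := splitAux_spec ('(' :: r) 0 []
                rw [hfz, hf] at hsp
                simp only [Option.map_some] at hsp
                rw [hsp, hstep]
                obtain ⟨hd, _⟩ := (scan_split r 1 (by omega)).2 k' hf
                rw [hd]
                have hkb := fz_bounds r 1 k' hf
                have ihv := ih (List.drop (k' + 1) ('(' :: r))
                  (by simp [List.length_drop] at *; omega)
                simp only [List.drop_succ_cons] at ihv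
                rw [ihv]
                simp [List.take_succ_cons]
          · have hlhs : isCorrectAux (c :: r) 0 = false := by
              simp [isCorrectAux, hc]
            have hsp := splitAux_spec (c :: r) 0 []
            rw [hlhs]
            cases hf : fz (c :: r) 0 with
            | none =>
                rw [hf] at hsp; simp at hsp
                rw [hsp]
                constructor
                · intro h; cases h
                · intro h; have := h (c :: r) (by simp); simp [hc] at this
            | some k =>
                rw [hf] at hsp; rw [hsp]
                have hkb := fz_bounds (c :: r) 0 k hf
                constructor
                · intro h; cases h
                · intro h
                  have := h ((c :: r).take k) (by simp)
                  rcases k with _ | k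
                  · omega
                  · simp [List.take_succ_cons, hc] at this

theorem core_eq_aux : ∀ (n : Nat) (l : List Char), l.length ≤ n →
    solutionCore l = solutionAltCore l := by
  intro n
  induction n with
  | zero =>
      intro l hl
      have : l = [] := by cases l <;> simp_all
      subst this
      rw [solutionCore]
      simp [isCorrectAux, solutionAltCore, splitAux, findM, goPS,
        PySem.List.slice_to ([] : List (List Char)) (by omega : (0:Int) ≤ 0)]
  | succ n ih =>
      intro l hl
      by_cases hC : isCorrectAux l 0 = true
      · -- correct input: A returns l, B's m is 0 so B keeps every block verbatim
        rw [solutionCore]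
        simp only [hC, if_pos rfl, if_true]
        have hgood := (correct_iff_blocks_aux l.length l le_rfl).1 hC
        have hnone : lastBad (splitAux l 0 []) = none := (lastBad_none_iff _).2 hgood
        have hm : findM (splitAux l 0 []) 0 0 = 0 := by rw [findM_spec, hnone]
        rw [solutionAltCore]
        simp only [hm]
        rw [PySem.List.slice_to _ (by omega : (0:Int) ≤ 0)]
        simp only [Int.toNat_zero, List.take_zero]
        rw [show PySem.List.slice (splitAux l 0 []) (some 0) none
              = splitAux l 0 [] by
            rw [PySem.List.slice_from _ (by omega : (0:Int) ≤ 0)]; simp]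
        simp [goPS, splitAux_flatten]
      · -- incorrect input: both sides split off the first block u = l.take k
        have hne : l ≠ [] := by rintro rfl; simp [isCorrectAux] at hC
        have hlp : 0 < l.length := by cases l <;> simp_all
        obtain ⟨k, hkdef⟩ : ∃ k : Nat, k = (fz l 0).getD l.length := ⟨_, rfl⟩
        have hk1 : 1 ≤ k ∧ k ≤ l.length := by
          rw [hkdef]; cases hf : fz l 0 with
          | none => simp; omega
          | some k' => have := fz_bounds l 0 k' hf; simpa using this
        have hsep : sepAux l 0 0 + 1 = ((k : Nat) : Int) := by
          rw [sepAux_spec, hkdef]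
          push_cast
          ring
        have hu : PySem.List.slice l none (some (sepAux l 0 0 + 1)) = l.take k := by
          rw [hsep, PySem.List.slice_to_natCast]
        have hv : PySem.List.slice l (some (sepAux l 0 0 + 1)) none = l.drop k := by
          rw [hsep, PySem.List.slice_from_natCast]
        obtain ⟨bv, hbvdef⟩ : ∃ bv, bv = splitAux (l.drop k) 0 [] := ⟨_, rfl⟩
        have hbs : splitAux l 0 [] = l.take k :: bv := by
          rw [splitAux_spec, hbvdef]
          cases hf : fz l 0 with
          | none =>
              have hk : k = l.length := by rw [hkdef, hf]; rfl
              simp [hne, hk, splitAux, List.drop_length]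
          | some k' =>
              have hk : k = k' := by rw [hkdef, hf]; rfl
              simp [hk]
        obtain ⟨mv, hmvdef⟩ : ∃ mv : Nat,
            mv = (match lastBad bv with | some i => i + 1 | none => 0) := ⟨_, rfl⟩
        have hmv : findM bv 0 0 = ((mv : Nat) : Int) := by
          rw [findM_spec, hmvdef]; cases lastBad bv <;> simp
        have hml : findM (l.take k :: bv) 0 0 = ((mv + 1 : Nat) : Int) := by
          rw [findM_spec]
          simp only [lastBad]
          cases hlb : lastBad bv with
          | some i => rw [hmvdef, hlb]; push_cast; ring
          | none =>
              rw [hmvdef, hlb]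
              have hbadu : ¬ (l.take k).head? = some '(' := by
                intro hgu
                have hall : ∀ b ∈ splitAux l 0 [], b.head? = some '(' := by
                  rw [hbs]
                  intro b hb
                  rcases List.mem_cons.1 hb with rfl | hb
                  · exact hgu
                  · exact (lastBad_none_iff bv).1 hlb b hb
                exact hC ((correct_iff_blocks_aux l.length l le_rfl).2 hall)
              simp [hbadu]
        -- B on l, with the first block made explicit
        have hBl : solutionAltCore l =
            (goPS (l.take k :: bv.take mv) [] []).1.flatten
              ++ (bv.drop mv).flatten
              ++ (goPS (l.take k :: bv.take mv) [] []).2.reverse.flatten := by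
          rw [solutionAltCore]
          simp only [hbs, hml]
          rw [PySem.List.slice_to_natCast, PySem.List.slice_from_natCast]
          simp [List.take_succ_cons, List.drop_succ_cons]
        have hBv : solutionAltCore (l.drop k) =
            (goPS (bv.take mv) [] []).1.flatten
              ++ (bv.drop mv).flatten
              ++ (goPS (bv.take mv) [] []).2.reverse.flatten := by
          rw [solutionAltCore]
          simp only [← hbvdef, hmv]
          rw [PySem.List.slice_to_natCast, PySem.List.slice_from_natCast]
        have ihv : solutionCore (l.drop k) = solutionAltCore (l.drop k) := by
          apply ih
          simp only [List.length_drop]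
          omega
        -- A on l
        rw [solutionCore]
        simp only [hC, if_false, hu, hv, Bool.false_eq_true]
        by_cases hgu : (l.take k).head? = some '('
        · -- u starts with '(': a correct minimal block on both sides
          have hu_corr : isCorrectAux (l.take k) 0 = true := by
            obtain ⟨c, r, rfl⟩ : ∃ c r, l = c :: r := by
              cases l with | nil => exact absurd rfl hne | cons c r => exact ⟨c, r, rfl⟩
            have hc : c = '(' := by
              rcases k with _ | k''
              · exact absurd hk1.1 (by omega)
              · simp [List.take_succ_cons] at hgu; exact hgu
            subst hc
            have hfz : fz ('(' :: r) 0 = (fz r 1).map (· + 1) := by simp [fz]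
            cases hf : fz r 1 with
            | none =>
                exfalso
                have : isCorrectAux ('(' :: r) 0 = true := by
                  simp [isCorrectAux]
                  exact (scan_split r 1 (by omega)).1 hf
                exact hC this
            | some k' =>
                have hkk : k = k' + 1 := by rw [hkdef, hfz, hf]; rfl
                subst hkk
                obtain ⟨_, ht⟩ := (scan_split r 1 (by omega)).2 k' hf
                simp only [List.take_succ_cons]
                simp [isCorrectAux]
                exact ht
          rw [if_pos hu_corr, ihv]
          rw [hBl]
          rw [show goPS (l.take k :: bv.take mv) [] []
                = goPS (bv.take mv) [l.take k] [] by simp [goPS, hgu]]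
          rw [goPS_acc]
          simp [hBv, List.append_assoc]
        · -- u starts with ')': an incorrect block, flipped-and-wrapped on both sides
          have hu_bad : isCorrectAux (l.take k) 0 = false := by
            obtain ⟨c, r, rfl⟩ : ∃ c r, l = c :: r := by
              cases l with | nil => exact absurd rfl hne | cons c r => exact ⟨c, r, rfl⟩
            rcases k with _ | k''
            · exact absurd hk1.1 (by omega)
            · simp only [List.take_succ_cons] at hgu ⊢
              simp at hgu
              simp [isCorrectAux, hgu]
          rw [hu_bad]
          simp only [Bool.false_eq_true, if_false, ihv]
          rw [hBl]
          rw [show goPS (l.take k :: bv.take mv) [] []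
                = goPS (bv.take mv) [['(']]
                    [')' :: (PySem.List.slice (l.take k) (some 1) (some (-1))).map pyflip] by
              simp [goPS, hgu]]
          rw [goPS_acc]
          simp [hBv, List.append_assoc]

theorem core_eq (l : List Char) : solutionCore l = solutionAltCore l :=
  core_eq_aux l.length l le_rfl

-- ===== VERDICT (by name: the statement is the Claim_ definition above) =====
theorem solution_spec : Claim_equal_solution := by
  intro p _
  unfold Spec_solution solution solution_alt
  exact congrArg String.mk (core_eq p.toList)
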